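-- pv_equiv track=rewrite | github.com/Jai2405/WATsched | app.py | split_days
-- ===== SOURCE A (Python) =====
-- def split_days(day_str):
--     day_str = day_str.upper()
--     days = []
--     i = 0
--     while i < len(day_str):
--         if day_str[i] == 'T' and i + 1 < len(day_str) and day_str[i + 1] == 'H':
--             days.append('TH')
--             i += 2
--         else:
--             days.append(day_str[i])
--             i += 1
--     return days
-- ===== SOURCE B (Python) =====
-- import re
--
-- def split_days(day_str):
--     return re.findall(r'TH|.', day_str.upper(), re.DOTALL)
-- ===== Notes on version B (the rewrite author's own statement) =====
-- stated objective: idiomatic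
-- what changed: Replaces the hand-written index/while tokenizer with a single regex findall ('TH|.' with DOTALL) that delegates the scan to the regex engine.
import Mathlib
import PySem

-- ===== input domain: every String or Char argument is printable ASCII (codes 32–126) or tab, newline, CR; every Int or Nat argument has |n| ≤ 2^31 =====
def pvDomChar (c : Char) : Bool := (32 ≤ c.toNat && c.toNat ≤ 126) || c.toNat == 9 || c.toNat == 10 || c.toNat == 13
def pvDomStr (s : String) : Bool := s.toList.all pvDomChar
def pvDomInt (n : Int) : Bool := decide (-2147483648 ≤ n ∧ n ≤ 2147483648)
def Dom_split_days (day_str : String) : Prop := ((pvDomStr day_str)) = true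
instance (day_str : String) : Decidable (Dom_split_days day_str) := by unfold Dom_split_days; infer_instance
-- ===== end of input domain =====

-- B replaces A's hand-written index/while tokenizer with re.findall(r'TH|.', s, re.DOTALL): idiomatic, same cost.

-- ===== PORT A =====
-- A's while loop over the uppercased string, indexing with i (always in range when read).
def splitDaysLoopA (cs : List Char) (i : Nat) (days : List String) : List String :=
  if i < cs.length then
    if (PySem.List.pyGet? cs (i : Int) == some 'T') && decide (i + 1 < cs.length)
        && (PySem.List.pyGet? cs ((i : Int) + 1) == some 'H') then
      splitDaysLoopA cs (i + 2) (days ++ ["TH"])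
    else
      splitDaysLoopA cs (i + 1)
        (days ++ [match PySem.List.pyGet? cs (i : Int) with
                  | some c => String.ofList [c]
                  | none => ""])
  else days
termination_by cs.length - i

def split_days (day_str : String) : List String :=
  splitDaysLoopA (PySem.Str.upper day_str).toList 0 []

-- ===== PORT B =====
-- re.findall(r'TH|.', s, re.DOTALL): at each position the alternation tries 'TH' first, else one char.
def findallTHdot : List Char → List String
  | [] => []
  | 'T' :: 'H' :: rest => "TH" :: findallTHdot rest
  | c :: rest => String.ofList [c] :: findallTHdot rest

def split_days_alt (day_str : String) : List String :=
  findallTHdot (PySem.Str.upper day_str).toList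

-- ===== PRECONDITION & SPEC =====
def Spec_split_days (day_str : String) (out : List String) : Prop := out = split_days_alt day_str
instance (day_str : String) (out : List String) : Decidable (Spec_split_days day_str out) := by unfold Spec_split_days; infer_instance

-- ===== CLAIM (what is proved, stated in full; the proofs are below) =====
def Claim_equal_split_days : Prop := ∀ (day_str : String), Dom_split_days day_str → Spec_split_days day_str (split_days day_str)

-- ===== LEMMAS AND PROOFS =====
theorem findall_cons_notTH (c : Char) (rest : List Char)
    (h : ¬(c = 'T' ∧ ∃ r, rest = 'H' :: r)) :
    findallTHdot (c :: rest) = String.ofList [c] :: findallTHdot rest := by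
  rw [findallTHdot.eq_def]
  split
  · next heq => exact absurd heq (by simp)
  · next heq =>
      obtain ⟨h1, h2⟩ := List.cons.inj heq
      exact absurd ⟨h1, _, h2⟩ h
  · next _ heq =>
      obtain ⟨h1, h2⟩ := List.cons.inj heq
      subst h1; subst h2; rfl

theorem splitDaysLoopA_eq (cs : List Char) (i : Nat) (days : List String) :
    splitDaysLoopA cs i days = days ++ findallTHdot (cs.drop i) := by
  fun_induction splitDaysLoopA cs i days with
  | case1 i days hlt hTH ih =>
      simp only [Bool.and_eq_true, beq_iff_eq, decide_eq_true_eq] at hTH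
      obtain ⟨⟨hgT, h1⟩, hgH⟩ := hTH
      have hT : cs[i] = 'T' := by
        simpa [PySem.List.pyGet?_natCast, List.getElem?_eq_getElem hlt] using hgT
      have hH : cs[i + 1] = 'H' := by
        have hc : ((i : Int) + 1) = ((i + 1 : Nat) : Int) := by push_cast; ring
        rw [hc, PySem.List.pyGet?_natCast, List.getElem?_eq_getElem h1] at hgH
        simpa using hgH
      rw [ih, List.drop_eq_getElem_cons hlt,
          show cs.drop (i + 1) = cs[i+1] :: cs.drop (i + 2) from List.drop_eq_getElem_cons h1,
          hT, hH]
      simp [findallTHdot]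
  | case2 i days hlt hTH ih =>
      simp only [Bool.and_eq_true, beq_iff_eq, decide_eq_true_eq, not_and] at hTH
      have hget : PySem.List.pyGet? cs (i : Int) = some cs[i] := by
        simp [PySem.List.pyGet?_natCast, List.getElem?_eq_getElem hlt]
      rw [ih, List.drop_eq_getElem_cons hlt, hget]
      have hkey : ¬(cs[i] = 'T' ∧ ∃ r, cs.drop (i + 1) = 'H' :: r) := by
        rintro ⟨hT, r, hr⟩
        have h1 : i + 1 < cs.length := by
          have := congrArg List.length hr
          simp at this; omega
        have hH : cs[i + 1] = 'H' := by
          have := List.drop_eq_getElem_cons h1 (l := cs)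
          rw [hr] at this
          exact (List.cons.inj this.symm).1
        refine hTH ⟨by rw [hget, hT], h1⟩ ?_
        have hc : ((i : Int) + 1) = ((i + 1 : Nat) : Int) := by push_cast; ring
        rw [hc, PySem.List.pyGet?_natCast, List.getElem?_eq_getElem h1, hH]
      rw [findall_cons_notTH _ _ hkey]
      simp
  | case3 i days hge =>
      have hnil : cs.drop i = [] := List.drop_eq_nil_of_le (by omega)
      simp [hnil, findallTHdot]
-- ===== VERDICT (by name: the statement is the Claim_ definition above) =====
theorem split_days_spec : Claim_equal_split_days := by
  intro s _
  unfold Spec_split_days split_days split_days_alt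
  simpa using splitDaysLoopA_eq (PySem.Str.upper s).toList 0 []
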